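-- pv_equiv track=rewrite | github.com/charSLee013/joycaption | dual_caption.py | trim_off_prompt
-- ===== SOURCE A (Python) =====
-- def trim_off_prompt(input_ids, eoh_id, eot_id):
--     """
--     从生成的token序列中裁剪掉提示部分
--     """
--     # 裁剪掉提示部分
--     while True:
--         try:
--             i = input_ids.index(eoh_id)
--         except ValueError:
--             break
--
--         input_ids = input_ids[i + 1:]
--
--     # 裁剪掉结尾
--     try:
--         i = input_ids.index(eot_id)
--     except ValueError:
--         return input_ids
--
--     return input_ids[:i]
-- ===== SOURCE B (Python) =====
-- def trim_off_prompt(input_ids, eoh_id, eot_id):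
--     # Single forward pass: keep an accumulator of tokens seen since the last
--     # eoh_id, resetting it whenever eoh_id appears; then emit tokens up to the
--     # first eot_id.
--     tail = []
--     for tok in input_ids:
--         if tok == eoh_id:
--             tail = []
--         else:
--             tail.append(tok)
--     out = []
--     for tok in tail:
--         if tok == eot_id:
--             return out
--         out.append(tok)
--     return tail
-- ===== Notes on version B (the rewrite author's own statement) =====
-- stated objective: simpler
-- what changed: Replaces A's repeated index()-and-reslice while-loop (quadratic in the worst case) with one forward pass that resets an accumulator at each eoh_id, then a single scan that stops at the first eot_id.
import Mathlib
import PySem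

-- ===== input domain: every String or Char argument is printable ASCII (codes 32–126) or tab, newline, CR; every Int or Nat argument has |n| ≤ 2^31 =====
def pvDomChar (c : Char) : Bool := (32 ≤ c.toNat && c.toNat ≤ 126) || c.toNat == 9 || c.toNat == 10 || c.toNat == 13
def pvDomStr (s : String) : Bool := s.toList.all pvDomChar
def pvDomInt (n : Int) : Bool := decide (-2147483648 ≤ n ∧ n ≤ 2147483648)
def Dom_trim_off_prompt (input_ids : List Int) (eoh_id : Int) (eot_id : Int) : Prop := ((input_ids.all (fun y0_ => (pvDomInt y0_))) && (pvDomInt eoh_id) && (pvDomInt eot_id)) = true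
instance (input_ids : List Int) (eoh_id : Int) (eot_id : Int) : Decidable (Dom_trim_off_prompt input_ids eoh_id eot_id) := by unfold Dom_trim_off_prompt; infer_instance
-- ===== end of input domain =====

-- B replaces A's repeated index()-and-reslice while-loop with a single forward pass
-- that resets an accumulator at each eoh_id, then one scan stopping at the first eot_id.


-- ===== PORT A =====
-- the 'while True: try i = input_ids.index(eoh_id) except ValueError: break; input_ids = input_ids[i+1:]' loop
def pvTrimLoopA (eoh : Int) (xs : List Int) : List Int :=
  match h : PySem.List.index? xs eoh with
  | none => xs
  | some i => pvTrimLoopA eoh (PySem.List.slice xs (some ((i : Int) + 1)) none)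
termination_by xs.length
decreasing_by
  obtain ⟨hk, _, _⟩ := PySem.List.getElem_of_index?_eq_some h
  have : ((i : Int) + 1) = ((i + 1 : Nat) : Int) := by push_cast; ring
  rw [this, PySem.List.slice_from_natCast]
  simp [List.length_drop]; omega

def trim_off_prompt (input_ids : List Int) (eoh_id : Int) (eot_id : Int) : List Int :=
  let t := pvTrimLoopA eoh_id input_ids
  match PySem.List.index? t eot_id with
  | none => t
  | some i => PySem.List.slice t none (some (i : Int))

-- ===== PORT B =====
-- the second loop of Source B: emit tokens of 'tail' until the first eot_id (early return), else return 'tail'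
def pvCutLoop (eot : Int) (out rest whole : List Int) : List Int :=
  match rest with
  | [] => whole
  | a :: t => if a == eot then out else pvCutLoop eot (out ++ [a]) t whole

def trim_off_prompt_alt (input_ids : List Int) (eoh_id : Int) (eot_id : Int) : List Int :=
  let tail := input_ids.foldl (fun acc tok => if tok == eoh_id then [] else acc ++ [tok]) []
  pvCutLoop eot_id [] tail tail

-- ===== PRECONDITION & SPEC =====
def Spec_trim_off_prompt (input_ids : List Int) (eoh_id : Int) (eot_id : Int) (out : List Int) : Prop := out = trim_off_prompt_alt input_ids eoh_id eot_id
instance (input_ids : List Int) (eoh_id : Int) (eot_id : Int) (out : List Int) : Decidable (Spec_trim_off_prompt input_ids eoh_id eot_id out) := by unfold Spec_trim_off_prompt; infer_instance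

-- ===== CLAIM (what is proved, stated in full; the proofs are below) =====
def Claim_equal_trim_off_prompt : Prop := ∀ (input_ids : List Int) (eoh_id : Int) (eot_id : Int), Dom_trim_off_prompt input_ids eoh_id eot_id → Spec_trim_off_prompt input_ids eoh_id eot_id (trim_off_prompt input_ids eoh_id eot_id)

-- ===== LEMMAS AND PROOFS =====

-- the suffix of xs after the last occurrence of e (xs itself if e ∉ xs)
def pvAfterLast (e : Int) : List Int → List Int
  | [] => []
  | a :: t => if e ∈ t then pvAfterLast e t else if a = e then t else a :: pvAfterLast e t

theorem pvAfterLast_of_not_mem (e : Int) (xs : List Int) (h : e ∉ xs) :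
    pvAfterLast e xs = xs := by
  induction xs with
  | nil => rfl
  | cons a t ih =>
    simp only [List.mem_cons, not_or] at h
    simp [pvAfterLast, h.2, Ne.symm h.1, ih h.2]

theorem pvAfterLast_cons_of_mem (e a : Int) (t : List Int) (h : a = e ∨ e ∈ t) :
    pvAfterLast e (a :: t) = pvAfterLast e t := by
  by_cases ht : e ∈ t
  · simp [pvAfterLast, ht]
  · have ha : a = e := h.resolve_right ht
    simp [pvAfterLast, ht, ha, pvAfterLast_of_not_mem e t ht]

theorem pvAfterLast_append_of_mem (e : Int) (pre rest : List Int) (h : e ∈ rest) :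
    pvAfterLast e (pre ++ rest) = pvAfterLast e rest := by
  induction pre with
  | nil => rfl
  | cons a p ih =>
    rw [List.cons_append, pvAfterLast_cons_of_mem e a (p ++ rest) (Or.inr (by simp [h])), ih]

theorem pvTrimLoopA_eq (e : Int) (xs : List Int) : pvTrimLoopA e xs = pvAfterLast e xs := by
  fun_induction pvTrimLoopA e xs with
  | case1 xs h =>
    rw [pvAfterLast_of_not_mem e xs ((PySem.List.index?_eq_none_iff xs e).mp h)]
  | case2 xs i h ih =>
    obtain ⟨pre, suf, hxs, hlen, -⟩ := (PySem.List.index?_eq_some_iff xs e i).mp h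
    have hcast : ((i : Int) + 1) = ((i + 1 : Nat) : Int) := by push_cast; ring
    rw [hcast, PySem.List.slice_from_natCast] at ih ⊢
    have hdrop : xs.drop (i + 1) = suf := by
      rw [hxs, show pre ++ e :: suf = (pre ++ [e]) ++ suf by simp,
        show i + 1 = (pre ++ [e]).length by simp [hlen], List.drop_left]
    rw [ih, hdrop, hxs, pvAfterLast_append_of_mem e pre (e :: suf) (by simp),
      pvAfterLast_cons_of_mem e e suf (Or.inl rfl)]

theorem pvFoldl_tail_eq (e : Int) (xs : List Int) : ∀ acc : List Int,
    xs.foldl (fun acc tok => if tok == e then [] else acc ++ [tok]) acc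
      = if e ∈ xs then pvAfterLast e xs else acc ++ xs := by
  induction xs with
  | nil => intro acc; simp
  | cons a t ih =>
    intro acc
    rw [List.foldl_cons]
    have hf : (fun (acc : List Int) tok => if tok == e then [] else acc ++ [tok]) acc a
        = if a = e then [] else acc ++ [a] := by simp
    simp only [hf]
    by_cases ha : a = e
    · rw [if_pos ha, ih, if_pos (by simp [ha] : e ∈ a :: t),
        pvAfterLast_cons_of_mem e a t (Or.inl ha)]
      by_cases ht : e ∈ t
      · rw [if_pos ht]
      · rw [if_neg ht, pvAfterLast_of_not_mem e t ht, List.nil_append]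
    · rw [if_neg ha, ih]
      by_cases ht : e ∈ t
      · rw [if_pos ht, if_pos (by simp [ht] : e ∈ a :: t),
          pvAfterLast_cons_of_mem e a t (Or.inr ht)]
      · rw [if_neg ht, if_neg (by simp [Ne.symm ha, ht] : ¬ e ∈ a :: t)]
        simp

theorem pvCutLoop_eq (eot : Int) (whole : List Int) : ∀ (rest out : List Int),
    pvCutLoop eot out rest whole
      = match PySem.List.index? rest eot with
        | none => whole
        | some i => out ++ rest.take i := by
  intro rest
  induction rest with
  | nil =>
    intro out
    rw [(PySem.List.index?_eq_none_iff ([] : List Int) eot).mpr (by simp)]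
    rfl
  | cons a t ih =>
    intro out
    by_cases ha : a = eot
    · subst ha
      rw [PySem.List.index?_cons_self]
      simp [pvCutLoop]
    · rw [PySem.List.index?_cons_of_ne t ha]
      simp only [pvCutLoop, beq_iff_eq, ha, if_false, ih]
      cases h : PySem.List.index? t eot with
      | none => simp
      | some i => simp

-- ===== VERDICT (by name: the statement is the Claim_ definition above) =====
theorem trim_off_prompt_spec : Claim_equal_trim_off_prompt := by
  intro input_ids eoh_id eot_id _
  unfold Spec_trim_off_prompt
  simp only [trim_off_prompt, trim_off_prompt_alt]
  have htail : input_ids.foldl (fun acc tok => if tok == eoh_id then [] else acc ++ [tok]) []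
      = pvAfterLast eoh_id input_ids := by
    rw [pvFoldl_tail_eq]
    by_cases h : eoh_id ∈ input_ids
    · rw [if_pos h]
    · rw [if_neg h, pvAfterLast_of_not_mem eoh_id input_ids h, List.nil_append]
  rw [htail, pvTrimLoopA_eq, pvCutLoop_eq]
  cases PySem.List.index? (pvAfterLast eoh_id input_ids) eot_id with
  | none => rfl
  | some i => simp [PySem.List.slice_to_natCast]
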